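-- pv_equiv track=rewrite | github.com/Nischal5123/Querying-With-Conflicts | src/binned-coi-resonable.py | _reachability_bitsets
-- ===== SOURCE A (Python) =====
-- from typing import List, Dict, Tuple, Set, Optional, Any
--
-- def _reachability_bitsets(items: List[Any], edges: Set[Tuple[Any,Any]]):
--     n = len(items)
--     idx = {v:i for i,v in enumerate(items)}
--     neigh = [[] for _ in range(n)]
--     for u,v in edges:
--         iu,iv = idx[u], idx[v]
--         if iu < iv:
--             neigh[iu].append(iv)
--     R = [0]*n
--     for i in range(n-1,-1,-1):
--         mask = 0
--         for j in neigh[i]: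
--             mask |= (1<<j) | R[j]
--         R[i] = mask
--     return idx, R
-- ===== SOURCE B (Python) =====
-- def _reachability_bitsets(items, edges):
--     # Per-source forward closure scan instead of a shared reverse-index DP table.
--     n = len(items)
--     idx = {v: i for i, v in enumerate(items)}
--     neigh = [[] for _ in range(n)]
--     for u, v in edges:
--         iu, iv = idx[u], idx[v]
--         if iu < iv:
--             neigh[iu].append(iv)
--     R = []
--     for i in range(n):
--         mask = 0
--         for j in neigh[i]:
--             mask |= 1 << j
--         for j in range(i + 1, n):
--             if (mask >> j) & 1:
--                 for k in neigh[j]: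
--                     mask |= 1 << k
--         R.append(mask)
--     return idx, R
-- ===== Notes on version B (the rewrite author's own statement) =====
-- stated objective: alternative
-- what changed: Replaces the shared reverse-index DP sweep (R[i] built from already-final R[j]) by an independent per-source forward closure scan: for each i it seeds the mask with i's direct successors and sweeps j upward, OR-ing in j's direct successors whenever bit j is set.
import Mathlib
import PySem

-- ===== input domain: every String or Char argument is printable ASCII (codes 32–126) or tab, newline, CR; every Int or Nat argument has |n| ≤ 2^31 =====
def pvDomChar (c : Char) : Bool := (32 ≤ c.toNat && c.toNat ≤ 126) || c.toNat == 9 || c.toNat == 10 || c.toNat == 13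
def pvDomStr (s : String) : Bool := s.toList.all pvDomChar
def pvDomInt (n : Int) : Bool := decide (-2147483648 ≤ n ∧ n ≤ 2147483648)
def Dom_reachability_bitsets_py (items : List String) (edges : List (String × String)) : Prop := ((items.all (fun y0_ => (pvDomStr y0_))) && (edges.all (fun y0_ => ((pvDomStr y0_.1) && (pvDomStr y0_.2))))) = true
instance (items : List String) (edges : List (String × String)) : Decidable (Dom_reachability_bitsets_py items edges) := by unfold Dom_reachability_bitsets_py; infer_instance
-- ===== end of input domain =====

-- B replaces A's shared reverse-index DP sweep by an independent per-source forward closure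
-- scan (an alternative of similar cost; no speed claim); both are proved equal wherever A raises no KeyError.

-- ===== PORT A =====
-- Python's  a << k  /  a >> k  with a Nat-typed shift amount (the PYSEM convention for int shifts)
def pvShl (a : Int) (k : Nat) : Int := a <<< k
def pvShr (a : Int) (k : Nat) : Int := a >>> k

-- idx = {v:i for i,v in enumerate(items)}   (identical line in A and B, shared helper)
def pvIdx (items : List String) : PySem.Dict String Int :=
  (PySem.List.enumerate items 0).foldl (fun d p => d.insert p.2 p.1) PySem.Dict.empty

-- neigh = [[] for _ in range(n)]; for u,v in edges: iu,iv = idx[u],idx[v]; if iu < iv: neigh[iu].append(iv)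
-- (identical lines in A and B, shared helper; getD's default 0 is only reached outside Pre_, where Python raises KeyError)
def pvNeigh (items : List String) (edges : List (String × String)) : List (List Int) :=
  edges.foldl (fun nb uv =>
    let iu := (pvIdx items).getD uv.1 0
    let iv := (pvIdx items).getD uv.2 0
    if iu < iv then nb.set iu.toNat ((nb.getD iu.toNat []) ++ [iv]) else nb)
    (List.replicate items.length [])

def reachability_bitsets_py (items : List String) (edges : List (String × String)) : (List (String × Int)) × List Int :=
  let n : Int := (items.length : Int)
  let idx := pvIdx items
  let neigh := pvNeigh items edges
  let R0 : List Int := List.replicate n.toNat 0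
  let R := (PySem.List.pyRange (n-1) (-1) (-1)).foldl (fun R i =>
      let mask := (PySem.List.pyGetD neigh i []).foldl (fun mask j =>
          PySem.Int.bor mask (PySem.Int.bor (pvShl 1 j.toNat) (PySem.List.pyGetD R j 0))) 0
      R.set i.toNat mask) R0
  (idx.items, R)

-- ===== PORT B =====
def reachability_bitsets_py_alt (items : List String) (edges : List (String × String)) : (List (String × Int)) × List Int :=
  let n : Int := (items.length : Int)
  let idx := pvIdx items
  let neigh := pvNeigh items edges
  let R := (PySem.List.pyRange 0 n 1).foldl (fun R i =>
      let mask0 := (PySem.List.pyGetD neigh i []).foldl (fun m j => PySem.Int.bor m (pvShl 1 j.toNat)) 0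
      let mask := (PySem.List.pyRange (i+1) n 1).foldl (fun m j =>
          if PySem.Int.band (pvShr m j.toNat) 1 ≠ 0 then
            (PySem.List.pyGetD neigh j []).foldl (fun m k => PySem.Int.bor m (pvShl 1 k.toNat)) m
          else m) mask0
      R ++ [mask]) []
  (idx.items, R)

-- ===== PRECONDITION & SPEC =====
-- Pre_ excludes exactly the inputs on which Python A raises KeyError: an edge endpoint absent from items.
def Pre_reachability_bitsets_py (items : List String) (edges : List (String × String)) : Prop :=
  ∀ p ∈ edges, p.1 ∈ items ∧ p.2 ∈ items

instance (items : List String) (edges : List (String × String)) : Decidable (Pre_reachability_bitsets_py items edges) := by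
  unfold Pre_reachability_bitsets_py; infer_instance

def pvWitness_reachability_bitsets_py : List String × (List (String × String)) :=
  (["a", "b", "c"], [("a", "b"), ("b", "c")])

def Spec_reachability_bitsets_py (items : List String) (edges : List (String × String)) (out : (List (String × Int)) × List Int) : Prop := out = reachability_bitsets_py_alt items edges
instance (items : List String) (edges : List (String × String)) (out : (List (String × Int)) × List Int) : Decidable (Spec_reachability_bitsets_py items edges out) := by unfold Spec_reachability_bitsets_py; infer_instance

-- ===== CLAIM (what is proved, stated in full; the proofs are below) =====
def Claim_equal_reachability_bitsets_py : Prop := ∀ (items : List String) (edges : List (String × String)), Dom_reachability_bitsets_py items edges → Pre_reachability_bitsets_py items edges → Spec_reachability_bitsets_py items edges (reachability_bitsets_py items edges)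

-- ===== LEMMAS AND PROOFS =====

theorem pvShl_one (k : Nat) : pvShl 1 k = ((1 <<< k : Nat) : Int) := rfl

theorem toNat_pvShl_one (k : Nat) : (pvShl 1 k).toNat = 1 <<< k := rfl

theorem pvShl_one_nonneg (k : Nat) : 0 ≤ pvShl 1 k := by
  rw [pvShl_one]; positivity

theorem pvShr_nonneg (m : Int) (k : Nat) (h : 0 ≤ m) : pvShr m k = ((m.toNat >>> k : Nat) : Int) := by
  cases m with
  | ofNat a => rfl
  | negSucc a => simp at h

theorem testBit_one_shift (x b : Nat) : (1 <<< x).testBit b = decide (x = b) := by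
  rw [Nat.shiftLeft_eq, one_mul, Nat.testBit_two_pow]

-- two nonnegative ints with the same bits are equal
theorem pv_mask_eq {m m' : Int} (hm : 0 ≤ m) (hm' : 0 ≤ m')
    (h : ∀ b : Nat, m.toNat.testBit b = m'.toNat.testBit b) : m = m' := by
  rw [← Int.toNat_of_nonneg hm, ← Int.toNat_of_nonneg hm']
  exact congrArg _ (Nat.eq_of_testBit_eq h)

-- values stored in pvIdx are enumerate indices: nonnegative, and 0 or < length
theorem foldl_insert_bound (N : Int) :
    ∀ (l : List (Int × String)) (d : PySem.Dict String Int),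
    (∀ s, 0 ≤ d.getD s 0 ∧ (d.getD s 0 = 0 ∨ d.getD s 0 < N)) →
    (∀ p ∈ l, 0 ≤ p.1 ∧ p.1 < N) →
    ∀ s, 0 ≤ (l.foldl (fun d p => d.insert p.2 p.1) d).getD s 0 ∧
      ((l.foldl (fun d p => d.insert p.2 p.1) d).getD s 0 = 0 ∨
       (l.foldl (fun d p => d.insert p.2 p.1) d).getD s 0 < N)
  | [], d, hd, _, s => hd s
  | p :: l, d, hd, hl, s => by
    simp only [List.foldl_cons]
    refine foldl_insert_bound N l _ (fun t => ?_) (fun q hq => hl q (List.mem_cons_of_mem _ hq)) s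
    rw [PySem.Dict.getD_insert]
    split_ifs with h
    · have := hl p (List.mem_cons_self ..)
      exact ⟨this.1, Or.inr this.2⟩
    · exact hd t

theorem pvIdx_getD_bound (items : List String) (s : String) :
    0 ≤ (pvIdx items).getD s 0 ∧
      ((pvIdx items).getD s 0 = 0 ∨ (pvIdx items).getD s 0 < (items.length : Int)) := by
  refine foldl_insert_bound _ _ _ (fun t => by simp [PySem.Dict.getD_empty]) ?_ s
  intro p hp
  rw [PySem.List.mem_enumerate_iff] at hp
  obtain ⟨k, hk, rfl⟩ := hp
  simp
  omega

theorem neigh_foldl_length (items : List String) :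
    ∀ (l : List (String × String)) (nb : List (List Int)),
    (l.foldl (fun nb uv =>
      let iu := (pvIdx items).getD uv.1 0
      let iv := (pvIdx items).getD uv.2 0
      if iu < iv then nb.set iu.toNat ((nb.getD iu.toNat []) ++ [iv]) else nb) nb).length = nb.length
  | [], _ => rfl
  | uv :: l, nb => by
    simp only [List.foldl_cons]
    rw [neigh_foldl_length items l]
    split_ifs <;> simp

theorem pvNeigh_length (items : List String) (edges : List (String × String)) :
    (pvNeigh items edges).length = items.length := by
  unfold pvNeigh; rw [neigh_foldl_length]; simp

-- every stored edge i → x is strictly forward and in range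
theorem neigh_foldl_sound (items : List String) :
    ∀ (l : List (String × String)) (nb : List (List Int)),
    (∀ (i : Nat) (x : Int), x ∈ nb.getD i [] → (i : Int) < x ∧ x < (items.length : Int)) →
    ∀ (i : Nat) (x : Int), x ∈ (l.foldl (fun nb uv =>
      let iu := (pvIdx items).getD uv.1 0
      let iv := (pvIdx items).getD uv.2 0
      if iu < iv then nb.set iu.toNat ((nb.getD iu.toNat []) ++ [iv]) else nb) nb).getD i [] →
      (i : Int) < x ∧ x < (items.length : Int)
  | [], nb, hnb => hnb
  | uv :: l, nb, hnb => by
    simp only [List.foldl_cons]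
    refine neigh_foldl_sound items l _ ?_
    intro i x hx
    split_ifs at hx with hlt
    · obtain ⟨hu1, hu2⟩ := pvIdx_getD_bound items uv.1
      obtain ⟨hv1, hv2⟩ := pvIdx_getD_bound items uv.2
      set iu := (pvIdx items).getD uv.1 0 with hiu
      set iv := (pvIdx items).getD uv.2 0 with hiv
      rw [List.getD_eq_getElem?_getD, List.getElem?_set] at hx
      by_cases hi : iu.toNat = i
      · subst hi
        by_cases hr : iu.toNat < nb.length
        · simp only [if_pos hr] at hx
          rcases List.mem_append.mp hx with h | h
          · exact hnb _ _ (by rwa [List.getD_eq_getElem?_getD])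
          · have hx' : x = iv := List.mem_singleton.mp h
            subst hx'
            have : iv ≠ 0 := by omega
            constructor
            · rw [Int.toNat_of_nonneg hu1]; exact hlt
            · omega
        · simp only [if_neg hr] at hx
          cases hx
      · simp only [if_neg hi] at hx
        exact hnb _ _ (by rwa [List.getD_eq_getElem?_getD])
    · exact hnb _ _ hx

theorem pvNeigh_sound (items : List String) (edges : List (String × String)) :
    ∀ (i : Nat) (x : Int), x ∈ (pvNeigh items edges).getD i [] →
      (i : Int) < x ∧ x < (items.length : Int) := by
  refine neigh_foldl_sound items edges _ ?_
  intro i x hx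
  rw [List.getD_eq_getElem?_getD] at hx
  rcases h : (List.replicate items.length ([] : List Int))[i]? with _ | v
  · simp [h] at hx
  · rw [h] at hx
    rw [List.getElem?_replicate] at h
    split_ifs at h
    · cases h; cases hx

-- reachability from i to k along stored forward edges whose intermediate nodes are < b
inductive pvReach (g : List (List Int)) (b : Nat) : Nat → Nat → Prop
  | single {i k : Nat} : ((k : Int) ∈ g.getD i []) → pvReach g b i k
  | step {i m k : Nat} : ((m : Int) ∈ g.getD i []) → m < b → pvReach g b m k → pvReach g b i k

theorem pvReach_mono {g : List (List Int)} {b b' i k : Nat} (hb : b ≤ b')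
    (h : pvReach g b i k) : pvReach g b' i k := by
  induction h with
  | single e => exact .single e
  | step e hm _ ih => exact .step e (lt_of_lt_of_le hm hb) ih

theorem pvReach_low {g : List (List Int)} {n : Nat}
    (hg : ∀ (i : Nat) (x : Int), x ∈ g.getD i [] → (i : Int) < x ∧ x < (n : Int))
    {b i k : Nat} (h : pvReach g b i k) (hb : b ≤ i + 1) : (k : Int) ∈ g.getD i [] := by
  cases h with
  | single e => exact e
  | step e hm _ => have := (hg _ _ e).1; omega

theorem pvReach_append {g : List (List Int)} {n : Nat}
    (hg : ∀ (i : Nat) (x : Int), x ∈ g.getD i [] → (i : Int) < x ∧ x < (n : Int))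
    {b b' i j : Nat} {x : Int} (h : pvReach g b i j) (hx : x ∈ g.getD j [])
    (hj : j < b') (hbb : b ≤ b') : pvReach g b' i x.toNat := by
  induction h with
  | @single i' k' e =>
    refine .step e hj (.single ?_)
    rwa [Int.toNat_of_nonneg (by have := (hg _ _ hx).1; omega)]
  | step e hm _ ih => exact .step e (by omega) (ih hx hj)

theorem pvReach_init {g : List (List Int)} {n : Nat}
    (hg : ∀ (i : Nat) (x : Int), x ∈ g.getD i [] → (i : Int) < x ∧ x < (n : Int))
    {i k : Nat} : pvReach g (i+1) i k ↔ ∃ x ∈ g.getD i [], x.toNat = k := by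
  constructor
  · intro h
    exact ⟨(k : Int), pvReach_low hg h le_rfl, Int.toNat_natCast k⟩
  · rintro ⟨x, hx, rfl⟩
    refine .single ?_
    rwa [Int.toNat_of_nonneg (by have := (hg _ _ hx).1; omega)]

theorem pvReach_dec {g : List (List Int)} {n : Nat}
    (hg : ∀ (i : Nat) (x : Int), x ∈ g.getD i [] → (i : Int) < x ∧ x < (n : Int))
    {i j k : Nat} :
    pvReach g (j+1) i k ↔
      pvReach g j i k ∨ (pvReach g j i j ∧ ∃ x ∈ g.getD j [], x.toNat = k) := by
  constructor
  · intro h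
    induction h with
    | single e => exact Or.inl (.single e)
    | @step i' m k' e hm r ih =>
      by_cases hmj : m = j
      · have hk : (k' : Int) ∈ g.getD m [] := pvReach_low hg r (by omega)
        rw [hmj] at e hk
        exact Or.inr ⟨.single e, (k' : Int), hk, Int.toNat_natCast k'⟩
      · have hmj' : m < j := by omega
        rcases ih with h1 | ⟨h1, h2⟩
        · exact Or.inl (.step e hmj' h1)
        · exact Or.inr ⟨.step e hmj' h1, h2⟩
  · rintro (h | ⟨h1, x, hx, rfl⟩)
    · exact pvReach_mono (by omega) h
    · exact pvReach_append hg h1 hx (by omega) (by omega)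

theorem pvReach_head {g : List (List Int)} {n : Nat}
    (hg : ∀ (i : Nat) (x : Int), x ∈ g.getD i [] → (i : Int) < x ∧ x < (n : Int))
    {i k : Nat} :
    pvReach g n i k ↔ ∃ x ∈ g.getD i [], (x.toNat = k ∨ pvReach g n x.toNat k) := by
  constructor
  · intro h
    cases h with
    | single e => exact ⟨(k : Int), e, Or.inl (Int.toNat_natCast k)⟩
    | @step i' m k' e hm r => exact ⟨(m : Int), e, Or.inr (by rwa [Int.toNat_natCast])⟩
  · rintro ⟨x, hx, hc⟩
    have hx0 : 0 ≤ x := by have := (hg _ _ hx).1; omega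
    rcases hc with rfl | h
    · exact .single (by rwa [Int.toNat_of_nonneg hx0])
    · refine .step (m := x.toNat) (by rwa [Int.toNat_of_nonneg hx0]) ?_ h
      have := (hg _ _ hx).2
      omega

theorem pvReach_oob {g : List (List Int)} {n : Nat} (hlen : g.length = n)
    {i k : Nat} (hi : n ≤ i) : ¬ pvReach g n i k := by
  intro h
  have : g.getD i [] = [] := by
    rw [List.getD_eq_getElem?_getD, List.getElem?_eq_none (by omega)]
    rfl
  cases h with
  | single e => rw [this] at e; cases e
  | step e _ _ => rw [this] at e; cases e

-- B's direct-successor OR-fold: bits of init plus one bit per list entry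
theorem foldl_bor_shift (l : List Int) (m : Int) (hm : 0 ≤ m) :
    0 ≤ l.foldl (fun m x => PySem.Int.bor m (pvShl 1 x.toNat)) m ∧
    ∀ b : Nat, (l.foldl (fun m x => PySem.Int.bor m (pvShl 1 x.toNat)) m).toNat.testBit b
      ↔ (m.toNat.testBit b ∨ ∃ x ∈ l, x.toNat = b) := by
  induction l generalizing m with
  | nil => simp [hm]
  | cons y l ih =>
    simp only [List.foldl_cons]
    have hcast : PySem.Int.bor m (pvShl 1 y.toNat) = ((m.toNat ||| 1 <<< y.toNat : Nat) : Int) := by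
      rw [PySem.Int.bor_of_nonneg hm (pvShl_one_nonneg y.toNat), toNat_pvShl_one]
    rw [hcast]
    obtain ⟨h1, h2⟩ := ih ((m.toNat ||| 1 <<< y.toNat : Nat) : Int) (by positivity)
    refine ⟨h1, fun b => ?_⟩
    rw [h2 b]
    simp only [Int.toNat_natCast, Nat.testBit_or, testBit_one_shift]
    constructor
    · rintro (h | h)
      · rcases Bool.or_eq_true_iff.mp h with h' | h'
        · exact Or.inl h'
        · exact Or.inr ⟨y, List.mem_cons_self .., by simpa using h'⟩
      · obtain ⟨x, hx, rfl⟩ := h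
        exact Or.inr ⟨x, List.mem_cons_of_mem _ hx, rfl⟩
    · rintro (h | ⟨x, hx, rfl⟩)
      · exact Or.inl (Bool.or_eq_true_iff.mpr (Or.inl h))
      · rcases List.mem_cons.mp hx with rfl | hx'
        · exact Or.inl (Bool.or_eq_true_iff.mpr (Or.inr (by simp)))
        · exact Or.inr ⟨x, hx', rfl⟩

-- A's inner OR-fold: one bit per entry plus the bits of f at the entry
theorem foldl_bor_shift2 (l : List Int) (f : Int → Int) (hf : ∀ j ∈ l, 0 ≤ f j)
    (m : Int) (hm : 0 ≤ m) :
    0 ≤ l.foldl (fun acc j => PySem.Int.bor acc (PySem.Int.bor (pvShl 1 j.toNat) (f j))) m ∧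
    ∀ b : Nat, (l.foldl (fun acc j => PySem.Int.bor acc (PySem.Int.bor (pvShl 1 j.toNat) (f j))) m).toNat.testBit b
      ↔ (m.toNat.testBit b ∨ ∃ j ∈ l, (j.toNat = b ∨ (f j).toNat.testBit b)) := by
  induction l generalizing m with
  | nil => simp [hm]
  | cons y l ih =>
    simp only [List.foldl_cons]
    have hfy : 0 ≤ f y := hf y (List.mem_cons_self ..)
    have hcast : PySem.Int.bor m (PySem.Int.bor (pvShl 1 y.toNat) (f y))
        = ((m.toNat ||| (1 <<< y.toNat ||| (f y).toNat) : Nat) : Int) := by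
      rw [PySem.Int.bor_of_nonneg (pvShl_one_nonneg y.toNat) hfy, toNat_pvShl_one,
          PySem.Int.bor_of_nonneg hm (Int.natCast_nonneg _), Int.toNat_natCast]
    rw [hcast]
    obtain ⟨h1, h2⟩ := ih (fun j hj => hf j (List.mem_cons_of_mem _ hj))
      ((m.toNat ||| (1 <<< y.toNat ||| (f y).toNat) : Nat) : Int) (Int.natCast_nonneg _)
    refine ⟨h1, fun b => ?_⟩
    rw [h2 b]
    simp only [Int.toNat_natCast, Nat.testBit_or, testBit_one_shift]
    constructor
    · rintro (h | h)
      · rcases Bool.or_eq_true_iff.mp h with h' | h'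
        · exact Or.inl h'
        · rcases Bool.or_eq_true_iff.mp h' with h'' | h''
          · exact Or.inr ⟨y, List.mem_cons_self .., Or.inl (by simpa using h'')⟩
          · exact Or.inr ⟨y, List.mem_cons_self .., Or.inr h''⟩
      · obtain ⟨j, hj, hc⟩ := h
        exact Or.inr ⟨j, List.mem_cons_of_mem _ hj, hc⟩
    · rintro (h | ⟨j, hj, hc⟩)
      · exact Or.inl (Bool.or_eq_true_iff.mpr (Or.inl h))
      · rcases List.mem_cons.mp hj with rfl | hj'
        · rcases hc with rfl | hc'
          · exact Or.inl (Bool.or_eq_true_iff.mpr (Or.inr (Bool.or_eq_true_iff.mpr (Or.inl (by simp)))))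
          · exact Or.inl (Bool.or_eq_true_iff.mpr (Or.inr (Bool.or_eq_true_iff.mpr (Or.inr hc'))))
        · exact Or.inr ⟨j, hj', hc⟩

-- Python's truthiness test  (mask >> j) & 1  on a nonnegative mask is Nat.testBit
theorem band_one_ne_zero (a : Nat) (j : Nat) :
    (PySem.Int.band (pvShr ((a : Nat) : Int) j) 1 ≠ 0) ↔ a.testBit j = true := by
  rw [pvShr_nonneg _ _ (Int.natCast_nonneg _), Int.toNat_natCast]
  rw [show ((1:Int)) = ((1:Nat) : Int) from rfl, PySem.Int.band_natCast]
  rw [Nat.testBit]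
  constructor
  · intro h
    simp only [bne_iff_ne, ne_eq]
    intro hc
    apply h
    rw [Nat.and_comm] at hc
    exact_mod_cast congrArg (Nat.cast : Nat → Int) hc
  · intro h hc
    have : (a >>> j) &&& 1 = 0 := by exact_mod_cast hc
    rw [Nat.and_comm] at this
    simp [this] at h

-- B's forward scan: from "reachable with intermediates < j" to full reachability
theorem scanB {g : List (List Int)} {n : Nat}
    (hg : ∀ (i : Nat) (x : Int), x ∈ g.getD i [] → (i : Int) < x ∧ x < (n : Int))
    (i : Nat) :
    ∀ (c j : Nat) (m : Int), j + c = n → i < j → 0 ≤ m →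
      (∀ b : Nat, m.toNat.testBit b ↔ pvReach g j i b) →
      0 ≤ (PySem.List.pyRange (j : Int) (n : Int) 1).foldl (fun m j =>
          if PySem.Int.band (pvShr m j.toNat) 1 ≠ 0 then
            (PySem.List.pyGetD g j []).foldl (fun m k => PySem.Int.bor m (pvShl 1 k.toNat)) m
          else m) m ∧
      ∀ b : Nat, ((PySem.List.pyRange (j : Int) (n : Int) 1).foldl (fun m j =>
          if PySem.Int.band (pvShr m j.toNat) 1 ≠ 0 then
            (PySem.List.pyGetD g j []).foldl (fun m k => PySem.Int.bor m (pvShl 1 k.toNat)) m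
          else m) m).toNat.testBit b ↔ pvReach g n i b := by
  intro c
  induction c with
  | zero =>
    intro j m hjc hij hm hbits
    have hj : j = n := by omega
    subst hj
    rw [PySem.List.pyRange_one_eq_nil le_rfl]
    exact ⟨hm, hbits⟩
  | succ c ih =>
    intro j m hjc hij hm hbits
    have hjn : j < n := by omega
    rw [PySem.List.pyRange_one_cons (by exact_mod_cast hjn)]
    rw [List.foldl_cons]
    have hcast : ((j : Int)).toNat = j := Int.toNat_natCast j
    have hgj : PySem.List.pyGetD g (j : Int) [] = g.getD j [] := by
      rw [PySem.List.pyGetD_of_nonneg _ _ (Int.natCast_nonneg _), hcast]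
    have hcond : (PySem.Int.band (pvShr m ((j:Int)).toNat) 1 ≠ 0) ↔ m.toNat.testBit j = true := by
      rw [hcast]
      conv_lhs => rw [show m = ((m.toNat : Nat) : Int) from (Int.toNat_of_nonneg hm).symm]
      exact band_one_ne_zero m.toNat j
    have hstep : ((j : Int)) + 1 = ((j + 1 : Nat) : Int) := by push_cast; ring
    by_cases hr : pvReach g j i j
    · have hcond' : (PySem.Int.band (pvShr m ((j:Int)).toNat) 1 ≠ 0) := by
        rw [hcond]; exact (hbits j).mpr hr
      rw [if_pos hcond', hgj]
      obtain ⟨h1, h2⟩ := foldl_bor_shift (g.getD j []) m hm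
      rw [hstep]
      refine ih (j+1) _ (by omega) (by omega) h1 ?_
      intro b
      rw [h2 b, pvReach_dec hg]
      constructor
      · rintro (h | ⟨x, hx, rfl⟩)
        · exact Or.inl ((hbits b).mp h)
        · exact Or.inr ⟨hr, x, hx, rfl⟩
      · rintro (h | ⟨_, x, hx, rfl⟩)
        · exact Or.inl ((hbits b).mpr h)
        · exact Or.inr ⟨x, hx, rfl⟩
    · have hcond' : ¬ (PySem.Int.band (pvShr m ((j:Int)).toNat) 1 ≠ 0) := by
        rw [hcond]
        intro hc
        exact hr ((hbits j).mp hc)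
      rw [if_neg hcond', hstep]
      refine ih (j+1) m (by omega) (by omega) hm ?_
      intro b
      rw [hbits b, pvReach_dec hg]
      constructor
      · exact Or.inl
      · rintro (h | ⟨h', _⟩)
        · exact h
        · exact absurd h' hr

-- A's reverse sweep: every processed slot holds its reach mask
theorem loopA {g : List (List Int)} {n : Nat}
    (hg : ∀ (i : Nat) (x : Int), x ∈ g.getD i [] → (i : Int) < x ∧ x < (n : Int)) :
    ∀ (i : Nat) (R : List Int), i ≤ n → R.length = n →
      (∀ k : Nat, i ≤ k → 0 ≤ PySem.List.pyGetD R (k : Int) 0 ∧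
        ∀ b : Nat, (PySem.List.pyGetD R (k : Int) 0).toNat.testBit b ↔ pvReach g n k b) →
      ((PySem.List.pyRange ((i : Int) - 1) (-1) (-1)).foldl (fun R i =>
        let mask := (PySem.List.pyGetD g i []).foldl (fun mask j =>
            PySem.Int.bor mask (PySem.Int.bor (pvShl 1 j.toNat) (PySem.List.pyGetD R j 0))) 0
        R.set i.toNat mask) R).length = n ∧
      ∀ k : Nat, 0 ≤ PySem.List.pyGetD ((PySem.List.pyRange ((i : Int) - 1) (-1) (-1)).foldl (fun R i =>
        let mask := (PySem.List.pyGetD g i []).foldl (fun mask j =>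
            PySem.Int.bor mask (PySem.Int.bor (pvShl 1 j.toNat) (PySem.List.pyGetD R j 0))) 0
        R.set i.toNat mask) R) (k : Int) 0 ∧
        ∀ b : Nat, (PySem.List.pyGetD ((PySem.List.pyRange ((i : Int) - 1) (-1) (-1)).foldl (fun R i =>
        let mask := (PySem.List.pyGetD g i []).foldl (fun mask j =>
            PySem.Int.bor mask (PySem.Int.bor (pvShl 1 j.toNat) (PySem.List.pyGetD R j 0))) 0
        R.set i.toNat mask) R) (k : Int) 0).toNat.testBit b ↔ pvReach g n k b := by
  intro i
  induction i with
  | zero =>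
    intro R hin hlenR hinv
    rw [show ((0:Nat):Int) - 1 = -1 by norm_num, PySem.List.pyRange_neg_one_eq_nil le_rfl]
    exact ⟨hlenR, fun k => hinv k (Nat.zero_le k)⟩
  | succ i ih =>
    intro R hin hlenR hinv
    have hcast : ((i+1 : Nat) : Int) - 1 = ((i : Nat) : Int) := by push_cast; ring
    have hgi : PySem.List.pyGetD g ((i:Nat) : Int) [] = g.getD i [] := by
      rw [PySem.List.pyGetD_of_nonneg _ _ (Int.natCast_nonneg _), Int.toNat_natCast]
    rw [hcast, PySem.List.pyRange_neg_one_cons (by omega), List.foldl_cons]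
    simp only [hgi, Int.toNat_natCast]
    have hf : ∀ j ∈ g.getD i [], 0 ≤ PySem.List.pyGetD R j 0 := by
      intro j hj
      have hb := hg i j hj
      have : j = ((j.toNat : Nat) : Int) := (Int.toNat_of_nonneg (by omega)).symm
      rw [this]
      exact (hinv j.toNat (by omega)).1
    have hmain := foldl_bor_shift2 (g.getD i []) (fun j => PySem.List.pyGetD R j 0) hf 0 le_rfl
    set mask := (g.getD i []).foldl (fun acc j =>
        PySem.Int.bor acc (PySem.Int.bor (pvShl 1 j.toNat) (PySem.List.pyGetD R j 0))) 0 with hmaskdef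
    obtain ⟨hm1, hm2⟩ := hmain
    have hmaskbits : ∀ b : Nat, mask.toNat.testBit b ↔ pvReach g n i b := by
      intro b
      rw [hm2 b, pvReach_head hg]
      simp only [Int.toNat_zero, Nat.zero_testBit, Bool.false_eq_true, false_or]
      constructor
      · rintro ⟨j, hj, hc⟩
        refine ⟨j, hj, ?_⟩
        rcases hc with rfl | hc'
        · exact Or.inl rfl
        · right
          have hb := hg i j hj
          have hje : j = ((j.toNat : Nat) : Int) := (Int.toNat_of_nonneg (by omega)).symm
          rw [hje] at hc'
          exact ((hinv j.toNat (by omega)).2 b).mp hc'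
      · rintro ⟨j, hj, hc⟩
        refine ⟨j, hj, ?_⟩
        rcases hc with rfl | hc'
        · exact Or.inl rfl
        · right
          have hb := hg i j hj
          have hje : j = ((j.toNat : Nat) : Int) := (Int.toNat_of_nonneg (by omega)).symm
          rw [hje]
          exact ((hinv j.toNat (by omega)).2 b).mpr hc'
    refine ih (R.set i mask) (by omega) (by simpa using hlenR) ?_
    intro k hk
    have hknn : (0:Int) ≤ (k : Int) := Int.natCast_nonneg k
    rw [PySem.List.pyGetD_of_nonneg _ _ hknn, Int.toNat_natCast,
        List.getD_eq_getElem?_getD, List.getElem?_set]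
    by_cases hik : i = k
    · subst hik
      rw [if_pos rfl, if_pos (by omega), Option.getD_some]
      exact ⟨hm1, hmaskbits⟩
    · rw [if_neg hik]
      have := hinv k (by omega)
      rwa [PySem.List.pyGetD_of_nonneg _ _ hknn, Int.toNat_natCast,
        List.getD_eq_getElem?_getD] at this

-- ===== VERDICT (by name: the statement is the Claim_ definition above) =====
set_option maxHeartbeats 2000000 in
theorem reachability_bitsets_py_spec : Claim_equal_reachability_bitsets_py := by
  intro items edges _ _
  unfold Spec_reachability_bitsets_py
  unfold reachability_bitsets_py reachability_bitsets_py_alt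
  have hg := pvNeigh_sound items edges
  have hlen := pvNeigh_length items edges
  set g := pvNeigh items edges with hgdef
  set n := items.length with hndef
  -- A's list
  have hA := loopA hg n (List.replicate ((n : Int)).toNat 0) le_rfl
    (by simp) ?inv
  case inv =>
    intro k hk
    have h0 : PySem.List.pyGetD (List.replicate ((n : Int)).toNat 0) ((k : Nat) : Int) 0 = (0 : Int) := by
      rw [PySem.List.pyGetD_of_nonneg _ _ (Int.natCast_nonneg _), Int.toNat_natCast,
          List.getD_eq_getElem?_getD, List.getElem?_eq_none (by simp; omega)]
      rfl
    rw [h0]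
    refine ⟨le_rfl, fun b => ?_⟩
    simp only [Int.toNat_zero, Nat.zero_testBit, Bool.false_eq_true, false_iff]
    exact pvReach_oob hlen (by omega)
  obtain ⟨hAlen, hAval⟩ := hA
  simp only [Int.toNat_natCast] at hAlen hAval ⊢
  rw [PySem.List.foldl_append_singleton_eq_map]
  refine congrArg (Prod.mk _) ?_
  apply List.ext_getElem
  · rw [hAlen]
    simp [PySem.List.length_pyRange_one]
  intro k hk1 hk2
  have hkn : k < n := by rwa [hAlen] at hk1
  simp only [List.nil_append, List.getElem_map]
  obtain ⟨hv0, hv1⟩ := hAval k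
  rw [PySem.List.pyGetD_of_nonneg _ _ (Int.natCast_nonneg _), Int.toNat_natCast,
      List.getD_eq_getElem?_getD, List.getElem?_eq_getElem hk1, Option.getD_some] at hv0 hv1
  rw [PySem.List.getElem_pyRange_one, zero_add]
  have hgk : PySem.List.pyGetD g ((k : Nat) : Int) [] = g.getD k [] := by
    rw [PySem.List.pyGetD_of_nonneg _ _ (Int.natCast_nonneg _), Int.toNat_natCast]
  rw [hgk]
  obtain ⟨hb0, hb1⟩ := foldl_bor_shift (g.getD k []) 0 le_rfl
  have hscan := scanB hg k (n - (k+1)) (k+1)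
    ((g.getD k []).foldl (fun m x => PySem.Int.bor m (pvShl 1 x.toNat)) 0)
    (by omega) (by omega) hb0 ?bits
  case bits =>
    intro b
    rw [hb1 b]
    simp only [Int.toNat_zero, Nat.zero_testBit, Bool.false_eq_true, false_or]
    exact (pvReach_init hg).symm
  rw [show ((k : Nat) : Int) + 1 = ((k + 1 : Nat) : Int) by push_cast; ring]
  obtain ⟨hs0, hs1⟩ := hscan
  refine pv_mask_eq hv0 hs0 (fun b => ?_)
  rw [Bool.eq_iff_iff]
  exact (hv1 b).trans (hs1 b).symm
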